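-- pv_equiv track=rewrite | github.com/rontavious999/pdf-doc-to-json-docling | content_processing/section_manager.py | get_current_section_universal
-- ===== SOURCE A (Python) =====
-- from typing import List, Dict, Any
--
-- def get_current_section_universal(line_idx: int, sections: Dict[int, str], default: str = "Patient Information Form") -> str:
--     """Get the current section for a given line index"""
--     current_section = default
--
--     # Find the most recent section header before this line
--     for section_line_idx in sorted(sections.keys()):
--         if section_line_idx <= line_idx:
--             current_section = sections[section_line_idx]
--         else:
--             break
--
--     return current_section
-- ===== SOURCE B (Python) =====
-- def get_current_section_universal(line_idx: int, sections, default: str = "Patient Information Form") -> str: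
--     """Get the current section for a given line index"""
--     best = None  # (key, value) with the largest key <= line_idx seen so far
--     for k, v in sections.items():
--         if k <= line_idx and (best is None or best[0] < k):
--             best = (k, v)
--     return default if best is None else best[1]
-- ===== Notes on version B (the rewrite author's own statement) =====
-- stated objective: faster
-- what changed: Replaced the sort-then-ordered-scan-with-break by a single unsorted pass over sections.items() that tracks the entry with the largest key <= line_idx (argmax), removing the sort entirely.
import Mathlib
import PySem

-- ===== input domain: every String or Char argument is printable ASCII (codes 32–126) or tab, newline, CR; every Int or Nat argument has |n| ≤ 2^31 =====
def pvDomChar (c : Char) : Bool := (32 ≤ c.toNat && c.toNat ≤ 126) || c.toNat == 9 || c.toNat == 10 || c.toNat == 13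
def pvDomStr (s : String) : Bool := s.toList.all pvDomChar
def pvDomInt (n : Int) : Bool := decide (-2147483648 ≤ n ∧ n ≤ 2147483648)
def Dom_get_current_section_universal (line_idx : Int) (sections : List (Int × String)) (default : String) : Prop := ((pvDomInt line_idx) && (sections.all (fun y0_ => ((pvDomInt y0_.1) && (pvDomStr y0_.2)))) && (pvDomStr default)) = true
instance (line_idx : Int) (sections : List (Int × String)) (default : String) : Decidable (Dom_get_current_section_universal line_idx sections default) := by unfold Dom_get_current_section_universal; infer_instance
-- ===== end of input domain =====

-- B replaces A's sort-then-ordered-scan-with-break by one unsorted argmax pass over the items (simpler, no sort).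


-- ===== PORT A =====
-- sections[k] (first-match association-list lookup; in A, k always comes from the keys so the fallback is unreachable)
def pvLookA (sections : List (Int × String)) (k : Int) (cur : String) : String :=
  match sections.find? (fun kv => kv.1 == k) with
  | some kv => kv.2
  | none => cur

-- the 'for … if … else break' loop over the sorted keys
def pvLoopA (line_idx : Int) (sections : List (Int × String)) : List Int → String → String
  | [], cur => cur
  | k :: rest, cur =>
      if k ≤ line_idx then pvLoopA line_idx sections rest (pvLookA sections k cur) else cur

def get_current_section_universal (line_idx : Int) (sections : List (Int × String)) (default : String) : String :=
  pvLoopA line_idx sections (PySem.List.sorted (sections.map (·.1)) (fun x => x) false) default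

-- ===== PORT B =====
-- loop body: keep the entry with the largest key ≤ line_idx seen so far
def pvStepB (line_idx : Int) (best : Option (Int × String)) (kv : Int × String) : Option (Int × String) :=
  if kv.1 ≤ line_idx then
    match best with
    | none => some kv
    | some b => if b.1 < kv.1 then some kv else best
  else best

def get_current_section_universal_alt (line_idx : Int) (sections : List (Int × String)) (default : String) : String :=
  match sections.foldl (pvStepB line_idx) none with
  | none => default
  | some b => b.2

-- ===== PRECONDITION & SPEC =====
def Spec_get_current_section_universal (line_idx : Int) (sections : List (Int × String)) (default : String) (out : String) : Prop := out = get_current_section_universal_alt line_idx sections default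
instance (line_idx : Int) (sections : List (Int × String)) (default : String) (out : String) : Decidable (Spec_get_current_section_universal line_idx sections default out) := by unfold Spec_get_current_section_universal; infer_instance

-- ===== CLAIM (what is proved, stated in full; the proofs are below) =====
def Claim_equal_get_current_section_universal : Prop := ∀ (line_idx : Int) (sections : List (Int × String)) (default : String), Dom_get_current_section_universal line_idx sections default → Spec_get_current_section_universal line_idx sections default (get_current_section_universal line_idx sections default)

-- ===== LEMMAS AND PROOFS =====

-- max of the keys ≤ line_idx (none if there is no such key)
def pvMaxQ (line_idx : Int) : List Int → Option Int
  | [] => none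
  | k :: ks =>
      let m := pvMaxQ line_idx ks
      if k ≤ line_idx then some (match m with | none => k | some m' => max k m') else m

theorem pvMaxQ_none_iff (li : Int) (ks : List Int) :
    pvMaxQ li ks = none ↔ ∀ k ∈ ks, ¬ k ≤ li := by
  induction ks with
  | nil => simp [pvMaxQ]
  | cons k ks ih =>
    simp only [pvMaxQ]
    split_ifs with h
    · constructor
      · intro hc; cases pvMaxQ li ks <;> simp_all
      · intro hall; exact absurd h (hall k (by simp))
    · simp only [List.mem_cons]
      constructor
      · intro hc x hx
        rcases hx with rfl | hx
        · exact h
        · exact (ih.mp hc) x hx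
      · intro hall; exact ih.mpr (fun x hx => hall x (Or.inr hx))

theorem pvMaxQ_some (li : Int) (ks : List Int) (m : Int) (h : pvMaxQ li ks = some m) :
    m ∈ ks ∧ m ≤ li ∧ ∀ k ∈ ks, k ≤ li → k ≤ m := by
  induction ks generalizing m with
  | nil => simp [pvMaxQ] at h
  | cons k ks ih =>
    simp only [pvMaxQ] at h
    split_ifs at h with hk
    · rcases hmq : pvMaxQ li ks with _ | m'
      · rw [hmq] at h; simp at h; subst h
        refine ⟨by simp, hk, ?_⟩
        intro x hx hxle
        rcases List.mem_cons.mp hx with rfl | hx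
        · exact le_refl _
        · exact absurd hxle (((pvMaxQ_none_iff li ks).mp hmq) x hx)
      · rw [hmq] at h; simp at h; subst h
        obtain ⟨hm'mem, hm'le, hm'max⟩ := ih m' hmq
        refine ⟨?_, ?_, ?_⟩
        · rcases max_choice k m' with hc | hc <;> rw [hc]
          · simp
          · exact List.mem_cons_of_mem _ hm'mem
        · exact max_le hk hm'le
        · intro x hx hxle
          rcases List.mem_cons.mp hx with rfl | hx
          · exact le_max_left _ _
          · exact le_trans (hm'max x hx hxle) (le_max_right _ _)
    · obtain ⟨hmem, hle, hmax⟩ := ih m h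
      refine ⟨List.mem_cons_of_mem _ hmem, hle, ?_⟩
      intro x hx hxle
      rcases List.mem_cons.mp hx with rfl | hx
      · exact absurd hxle hk
      · exact hmax x hx hxle

theorem pvMaxQ_perm (li : Int) {ks ks' : List Int} (p : ks.Perm ks') :
    pvMaxQ li ks = pvMaxQ li ks' := by
  rcases h : pvMaxQ li ks with _ | m <;> rcases h' : pvMaxQ li ks' with _ | m'
  · rfl
  · obtain ⟨hm, hle, _⟩ := pvMaxQ_some li ks' m' h'
    exact absurd hle (((pvMaxQ_none_iff li ks).mp h) m' (p.mem_iff.mpr hm))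
  · obtain ⟨hm, hle, _⟩ := pvMaxQ_some li ks m h
    exact absurd hle (((pvMaxQ_none_iff li ks').mp h') m (p.mem_iff.mp hm))
  · obtain ⟨hm, hle, hmax⟩ := pvMaxQ_some li ks m h
    obtain ⟨hm', hle', hmax'⟩ := pvMaxQ_some li ks' m' h'
    have h1 : m ≤ m' := hmax' m (p.mem_iff.mp hm) hle
    have h2 : m' ≤ m := hmax m' (p.mem_iff.mpr hm') hle'
    simp [le_antisymm h1 h2]

theorem pvLookA_isSome (sections : List (Int × String)) (k : Int)
    (h : k ∈ sections.map (·.1)) (cur cur' : String) :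
    pvLookA sections k cur = pvLookA sections k cur' := by
  obtain ⟨kv, hmem, hfst⟩ := List.mem_map.mp h
  have : (sections.find? (fun kv => kv.1 == k)).isSome := by
    rw [List.find?_isSome]
    exact ⟨kv, hmem, by simp [hfst]⟩
  unfold pvLookA
  rcases hf : sections.find? (fun kv => kv.1 == k) with _ | kv'
  · rw [hf] at this; simp at this
  · rw [hf]

theorem pvLoopA_char (li : Int) (sections : List (Int × String)) (keys : List Int)
    (hsorted : keys.Pairwise (· ≤ ·)) (hmem : ∀ k ∈ keys, k ∈ sections.map (·.1)) :
    ∀ cur, pvLoopA li sections keys cur =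
      match pvMaxQ li keys with
      | none => cur
      | some m => pvLookA sections m "" := by
  induction keys with
  | nil => intro cur; simp [pvLoopA, pvMaxQ]
  | cons k rest ih =>
    intro cur
    rcases List.pairwise_cons.mp hsorted with ⟨hall, hp⟩
    have hmemr : ∀ x ∈ rest, x ∈ sections.map (·.1) := fun x hx => hmem x (List.mem_cons_of_mem _ hx)
    have hkm : k ∈ sections.map (·.1) := hmem k (by simp)
    simp only [pvLoopA, pvMaxQ]
    split_ifs with hk
    · rw [ih hp hmemr]
      rcases hmq : pvMaxQ li rest with _ | m'
      · simp only []
        exact pvLookA_isSome sections k hkm cur ""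
      · obtain ⟨hm'mem, _, _⟩ := pvMaxQ_some li rest m' hmq
        have : max k m' = m' := max_eq_right (hall m' hm'mem)
        simp [this]
    · have : pvMaxQ li rest = none := by
        rw [pvMaxQ_none_iff]
        intro x hx hxle
        exact hk (le_trans (hall x hx) hxle)
      simp [this]

theorem pvLookA_cons (k : Int) (v : String) (rest : List (Int × String)) (m : Int) (cur : String) :
    pvLookA ((k, v) :: rest) m cur = if k = m then v else pvLookA rest m cur := by
  by_cases h : k = m <;> simp [pvLookA, h]

theorem pvFoldB_char (li : Int) (l : List (Int × String)) :
    ∀ (best : Option (Int × String)),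
      l.foldl (pvStepB li) best =
        match pvMaxQ li (l.map (·.1)) with
        | none => best
        | some m =>
          match best with
          | none => some (m, pvLookA l m "")
          | some b => if b.1 < m then some (m, pvLookA l m "") else best := by
  induction l with
  | nil => intro best; simp [pvMaxQ]
  | cons kv rest ih =>
    intro best
    obtain ⟨k, v⟩ := kv
    simp only [List.foldl_cons, List.map_cons, pvMaxQ]
    by_cases hk : k ≤ li
    · rw [if_pos hk]
      rcases hmq : pvMaxQ li (rest.map (·.1)) with _ | m'
      · -- no qualifying key in rest; result is (k, v) merged into best
        cases best with
        | none =>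
          simp [pvStepB, hk, ih, hmq, pvLookA_cons]
        | some b =>
          by_cases hb : b.1 < k
          · simp [pvStepB, hk, hb, ih, hmq, pvLookA_cons]
          · simp [pvStepB, hk, hb, ih, hmq]
      · obtain ⟨hm'mem, hm'le, hm'max⟩ := pvMaxQ_some li (rest.map (·.1)) m' hmq
        cases best with
        | none =>
          simp only [pvStepB, if_pos hk, ih, hmq]
          by_cases hkm : k < m'
          · have hmax : max k m' = m' := max_eq_right (le_of_lt hkm)
            have hne : ¬ k = m' := ne_of_lt hkm
            simp [hmax, hkm, pvLookA_cons, hne]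
          · have hle : m' ≤ k := le_of_not_gt hkm
            have hmax : max k m' = k := max_eq_left hle
            simp [hmax, hkm, pvLookA_cons]
        | some b =>
          by_cases hb : b.1 < k
          · simp only [pvStepB, if_pos hk, if_pos hb, ih, hmq]
            by_cases hkm : k < m'
            · have hmax : max k m' = m' := max_eq_right (le_of_lt hkm)
              have hne : ¬ k = m' := ne_of_lt hkm
              have hbm : b.1 < m' := lt_trans hb hkm
              simp [hmax, hkm, pvLookA_cons, hne, hbm]
            · have hle : m' ≤ k := le_of_not_gt hkm
              have hmax : max k m' = k := max_eq_left hle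
              simp [hmax, hkm, pvLookA_cons, hb]
          · have hkb : k ≤ b.1 := le_of_not_gt hb
            simp only [pvStepB, if_pos hk, if_neg hb, ih, hmq]
            by_cases hbm : b.1 < m'
            · have hkm : k < m' := lt_of_le_of_lt hkb hbm
              have hmax : max k m' = m' := max_eq_right (le_of_lt hkm)
              have hne : ¬ k = m' := ne_of_lt hkm
              simp [hmax, hbm, pvLookA_cons, hne]
            · have hle : m' ≤ b.1 := le_of_not_gt hbm
              have hmax : ¬ b.1 < max k m' := by
                rcases max_choice k m' with hc | hc <;> rw [hc] <;> omega
              simp [hbm, hmax]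
    · rw [if_neg hk]
      have step : pvStepB li best (k, v) = best := by
        simp [pvStepB, hk]
      rw [step, ih]
      rcases hmq : pvMaxQ li (rest.map (·.1)) with _ | m'
      · simp [hmq]
      · obtain ⟨_, hm'le, _⟩ := pvMaxQ_some li (rest.map (·.1)) m' hmq
        have hne : ¬ k = m' := by intro h; exact hk (h ▸ hm'le)
        cases best with
        | none => simp [hmq, pvLookA_cons, hne]
        | some b => simp [hmq, pvLookA_cons, hne]

theorem pvA_char (li : Int) (sections : List (Int × String)) (default : String) :
    get_current_section_universal li sections default =
      match pvMaxQ li (sections.map (·.1)) with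
      | none => default
      | some m => pvLookA sections m "" := by
  unfold get_current_section_universal
  have hperm := PySem.List.sorted_perm (xs := sections.map (·.1)) (key := fun x => x) (rev := false)
  have hs := PySem.List.sorted_pairwise (xs := sections.map (·.1)) (key := fun x => x)
  rw [pvLoopA_char li sections _ hs (fun k hk => hperm.mem_iff.mp hk) default,
      pvMaxQ_perm li hperm]

theorem pvB_char (li : Int) (sections : List (Int × String)) (default : String) :
    get_current_section_universal_alt li sections default =
      match pvMaxQ li (sections.map (·.1)) with
      | none => default
      | some m => pvLookA sections m "" := by
  unfold get_current_section_universal_alt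
  rw [pvFoldB_char li sections none]
  rcases h : pvMaxQ li (sections.map (·.1)) with _ | m <;> simp [h]

-- ===== VERDICT (by name: the statement is the Claim_ definition above) =====
theorem get_current_section_universal_spec : Claim_equal_get_current_section_universal := by
  intro li sections default _
  unfold Spec_get_current_section_universal
  rw [pvA_char, pvB_char]
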